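-- pv_equiv track=rewrite | github.com/annwhoorma/tinkoff-ml | sudoku/main.py | is_line_valid
-- ===== SOURCE A (Python) =====
-- SIZE = 9
--
-- def is_line_valid(line):
--     for i in range(SIZE):
--         for j in range(i + 1, SIZE):
--             if line[i] == 0 or line[j] == 0:
--                 continue
--             if line[i] == line[j]:
--                 return False
--     return True
-- ===== SOURCE B (Python) =====
-- SIZE = 9
--
-- def is_line_valid(line):
--     seen = set()
--     for i in range(SIZE):
--         x = line[i]
--         if x == 0:
--             continue
--         if x in seen:
--             return False
--         seen.add(x)
--     return True
-- ===== Notes on version B (the rewrite author's own statement) =====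
-- stated objective: simpler
-- what changed: Replaces the O(n^2) pairwise double loop with a single pass over the nine indices maintaining a set of already-seen nonzero values.
import Mathlib
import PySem

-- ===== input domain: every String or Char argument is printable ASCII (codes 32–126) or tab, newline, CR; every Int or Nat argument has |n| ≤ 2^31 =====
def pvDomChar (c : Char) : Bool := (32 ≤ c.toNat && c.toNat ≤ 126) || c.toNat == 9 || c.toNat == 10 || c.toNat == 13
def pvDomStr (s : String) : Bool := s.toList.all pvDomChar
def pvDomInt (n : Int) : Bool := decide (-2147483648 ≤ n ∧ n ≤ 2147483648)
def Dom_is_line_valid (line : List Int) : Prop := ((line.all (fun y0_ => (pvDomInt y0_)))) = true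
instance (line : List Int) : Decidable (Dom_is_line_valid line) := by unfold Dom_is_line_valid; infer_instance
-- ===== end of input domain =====

-- B replaces A's pairwise double loop over the nine indices by a single scan maintaining a set of seen nonzero values (simpler; SIZE is the constant 9, so no speed is claimed).

-- ===== PORT A =====
-- inner 'for j in range(i+1, SIZE)' loop; false = the 'return False'
def pvAinner (line : List Int) (i : Int) : List Int → Bool
  | [] => true
  | j :: js =>
    if PySem.List.pyGetD line i 0 = 0 ∨ PySem.List.pyGetD line j 0 = 0 then pvAinner line i js
    else if PySem.List.pyGetD line i 0 = PySem.List.pyGetD line j 0 then false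
    else pvAinner line i js

-- outer 'for i in range(SIZE)' loop; && propagates the early 'return False'
def pvAouter (line : List Int) : List Int → Bool
  | [] => true
  | i :: is_ => pvAinner line i (PySem.List.pyRange (i + 1) 9 1) && pvAouter line is_

def is_line_valid (line : List Int) : Bool :=
  pvAouter line (PySem.List.pyRange 0 9 1)

-- ===== PORT B =====
def pvBloop (line : List Int) (seen : PySem.Set Int) : List Int → Bool
  | [] => true
  | i :: is_ =>
    let x := PySem.List.pyGetD line i 0
    if x = 0 then pvBloop line seen is_
    else if x ∈ seen then false
    else pvBloop line (PySem.Set.add seen x) is_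

def is_line_valid_alt (line : List Int) : Bool :=
  pvBloop line PySem.Set.empty (PySem.List.pyRange 0 9 1)

-- ===== PRECONDITION & SPEC =====
-- Exactly the inputs on which Python A returns: length ≥ 9 (no IndexError possible), or a short
-- list whose first nonzero element has a later duplicate, so A returns False before the
-- out-of-range access line[len] happens.
def Pre_is_line_valid (line : List Int) : Prop :=
  9 ≤ line.length ∨
    ∃ i < line.length, line.getD i 0 ≠ 0 ∧ (∀ k < i, line.getD k 0 = 0) ∧
      ∃ j < line.length, i < j ∧ line.getD j 0 = line.getD i 0
instance (line : List Int) : Decidable (Pre_is_line_valid line) := by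
  unfold Pre_is_line_valid; infer_instance

def pvWitness_is_line_valid : List Int := [1, 2, 3, 4, 5, 6, 7, 8, 9]

def Spec_is_line_valid (line : List Int) (out : Bool) : Prop := out = is_line_valid_alt line
instance (line : List Int) (out : Bool) : Decidable (Spec_is_line_valid line out) := by
  unfold Spec_is_line_valid; infer_instance

-- ===== CLAIM (what is proved, stated in full; the proofs are below) =====
def Claim_equal_is_line_valid : Prop :=
  ∀ (line : List Int), Dom_is_line_valid line → Pre_is_line_valid line →
    Spec_is_line_valid line (is_line_valid line)

-- ===== LEMMAS AND PROOFS =====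

-- the condition under which the pair (i, j) does NOT trigger 'return False'
def pvOk (line : List Int) (i j : Int) : Prop :=
  PySem.List.pyGetD line i 0 = 0 ∨ PySem.List.pyGetD line j 0 = 0 ∨
    PySem.List.pyGetD line i 0 ≠ PySem.List.pyGetD line j 0

theorem pvAinner_iff (line : List Int) (i : Int) (js : List Int) :
    pvAinner line i js = true ↔ ∀ j ∈ js, pvOk line i j := by
  induction js with
  | nil => simp [pvAinner]
  | cons j js ih =>
    simp only [pvAinner, List.mem_cons]
    split_ifs with h1 h2
    · rw [ih]
      constructor
      · intro h j' hj'
        rcases hj' with rfl | hj'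
        · unfold pvOk; tauto
        · exact h j' hj'
      · intro h j' hj'; exact h j' (Or.inr hj')
    · simp only [false_iff]
      intro h
      rcases h j (Or.inl rfl) with hz | hz | hz
      · exact h1 (Or.inl hz)
      · exact h1 (Or.inr hz)
      · exact hz h2
    · rw [ih]
      constructor
      · intro h j' hj'
        rcases hj' with rfl | hj'
        · exact Or.inr (Or.inr h2)
        · exact h j' hj'
      · intro h j' hj'; exact h j' (Or.inr hj')

theorem pvAouter_iff (line : List Int) (is_ : List Int) :
    pvAouter line is_ = true ↔
      ∀ i ∈ is_, pvAinner line i (PySem.List.pyRange (i + 1) 9 1) = true := by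
  induction is_ with
  | nil => simp [pvAouter]
  | cons i is_ ih => simp [pvAouter, Bool.and_eq_true, ih]

theorem pvBloop_iff (line : List Int) (js : List Int) :
    ∀ (seen : PySem.Set Int),
      pvBloop line seen js = true ↔
        ((∀ j ∈ js, PySem.List.pyGetD line j 0 ≠ 0 → PySem.List.pyGetD line j 0 ∉ seen) ∧
          List.Pairwise (fun i j => pvOk line i j) js) := by
  induction js with
  | nil => intro seen; simp [pvBloop]
  | cons i js ih =>
    intro seen
    simp only [pvBloop, List.mem_cons, List.pairwise_cons]
    split_ifs with h1 h2
    · -- line[i] == 0: skipped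
      rw [ih]
      constructor
      · rintro ⟨hm, hp⟩
        refine ⟨fun j hj => ?_, fun j hj => Or.inl h1, hp⟩
        rcases hj with rfl | hj
        · intro hne; exact absurd h1 hne
        · exact hm j hj
      · rintro ⟨hm, _, hp⟩
        exact ⟨fun j hj => hm j (Or.inr hj), hp⟩
    · -- nonzero and already seen: return False
      simp only [false_iff]
      rintro ⟨hm, -⟩
      exact absurd (hm i (Or.inl rfl) h1) (by simpa using h2)
    · -- nonzero and fresh: add to seen
      rw [ih]
      simp only [PySem.Set.mem_add]
      constructor
      · rintro ⟨hm, hp⟩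
        refine ⟨fun j hj hjne => ?_, fun j hj => ?_, hp⟩
        · rcases hj with rfl | hj
          · exact h2
          · intro hs; exact (hm j hj hjne) (Or.inl hs)
        · by_cases hz : PySem.List.pyGetD line j 0 = 0
          · exact Or.inr (Or.inl hz)
          · have := hm j hj hz
            exact Or.inr (Or.inr (fun he => this (Or.inr he.symm)))
      · rintro ⟨hm, hok, hp⟩
        refine ⟨fun j hj hjne hin => ?_, hp⟩
        rcases hin with hin | heq
        · exact (hm j (Or.inr hj) hjne) hin
        · rcases hok j hj with hz | hz | hz
          · exact h1 hz
          · exact hjne hz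
          · exact hz heq.symm

theorem pvPairwise_pyRange (R : Int → Int → Prop) :
    ∀ (n : Nat) (a b : Int), b - a ≤ n →
      (List.Pairwise R (PySem.List.pyRange a b 1) ↔
        ∀ i j, a ≤ i → i < j → j < b → R i j) := by
  intro n
  induction n with
  | zero =>
    intro a b hn
    rw [PySem.List.pyRange_one_eq_nil (by omega)]
    exact ⟨fun _ i j hi hij hj => by omega, fun _ => List.Pairwise.nil⟩
  | succ n ih =>
    intro a b hn
    by_cases hab : a < b
    · rw [PySem.List.pyRange_one_cons hab, List.pairwise_cons,
        ih (a + 1) b (by omega)]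
      constructor
      · rintro ⟨h1, h2⟩ i j hi hij hj
        rcases eq_or_lt_of_le hi with rfl | hlt
        · exact h1 j (by rw [PySem.List.mem_pyRange_one]; omega)
        · exact h2 i j (by omega) hij hj
      · intro h
        refine ⟨fun j hj => ?_, fun i j hi hij hj => h i j (by omega) hij hj⟩
        rw [PySem.List.mem_pyRange_one] at hj
        exact h a j le_rfl (by omega) (by omega)
    · rw [PySem.List.pyRange_one_eq_nil (by omega)]
      exact ⟨fun _ i j hi hij hj => by omega, fun _ => List.Pairwise.nil⟩

theorem pvA_iff (line : List Int) :
    is_line_valid line = true ↔ ∀ i j, 0 ≤ i → i < j → j < 9 → pvOk line i j := by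
  unfold is_line_valid
  rw [pvAouter_iff]
  constructor
  · intro h i j hi hij hj
    have hmem : i ∈ PySem.List.pyRange 0 9 1 := by
      rw [PySem.List.mem_pyRange_one]; omega
    have := (pvAinner_iff line i _).mp (h i hmem)
    exact this j (by rw [PySem.List.mem_pyRange_one]; omega)
  · intro h i hi
    rw [PySem.List.mem_pyRange_one] at hi
    rw [pvAinner_iff]
    intro j hj
    rw [PySem.List.mem_pyRange_one] at hj
    exact h i j (by omega) (by omega) (by omega)

theorem pvB_iff (line : List Int) :
    is_line_valid_alt line = true ↔ ∀ i j, 0 ≤ i → i < j → j < 9 → pvOk line i j := by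
  unfold is_line_valid_alt
  rw [pvBloop_iff]
  rw [pvPairwise_pyRange (fun i j => pvOk line i j) 9 0 9 (by omega)]
  simp [PySem.Set.empty]

-- ===== VERDICT (by name: the statement is the Claim_ definition above) =====
theorem is_line_valid_spec : Claim_equal_is_line_valid := by
  intro line _ _
  unfold Spec_is_line_valid
  rw [Bool.eq_iff_iff]
  exact (pvA_iff line).trans (pvB_iff line).symm
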